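-- pv_equiv track=rewrite | github.com/choucoder/competitive-programming | practice/codejam/2019/qualification_round/own_way.py | solve
-- ===== SOURCE A (Python) =====
-- def solve(n=2, p='SE'):
--     _p = ''
--     _aux = ''
--     for pi in p:
--         _aux += pi
--         if _aux.count('E') and _aux.count('S'):
--             _aux = _aux[::-1]
--             _p += _aux
--             _aux = ''
--     return _p
-- ===== SOURCE B (Python) =====
-- def solve(n=2, p='SE'):
--     parts = []
--     rest = p
--     while True:
--         i = rest.find('S')
--         j = rest.find('E')
--         if i < 0 or j < 0:
--             break
--         k = max(i, j) + 1
--         parts.append(rest[:k][::-1])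
--         rest = rest[k:]
--     return ''.join(parts)
-- ===== Notes on version B (the rewrite author's own statement) =====
-- stated objective: faster
-- what changed: Instead of growing a character buffer and re-counting it at every character, B repeatedly locates the next chunk boundary directly with str.find('S')/find('E') on the remaining string, reverses that slice and cuts it off.
import Mathlib
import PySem

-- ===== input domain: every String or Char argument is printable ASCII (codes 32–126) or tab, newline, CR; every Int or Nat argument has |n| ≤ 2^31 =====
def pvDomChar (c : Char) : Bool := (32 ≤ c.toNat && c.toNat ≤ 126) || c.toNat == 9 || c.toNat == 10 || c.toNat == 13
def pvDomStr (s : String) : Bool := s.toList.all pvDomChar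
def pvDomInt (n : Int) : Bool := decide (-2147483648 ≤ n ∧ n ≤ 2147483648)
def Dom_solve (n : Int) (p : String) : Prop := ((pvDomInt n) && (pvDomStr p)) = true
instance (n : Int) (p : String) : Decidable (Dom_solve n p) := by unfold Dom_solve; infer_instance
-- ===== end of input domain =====

-- B replaces A's per-character buffer-and-recount loop by repeated find('S')/find('E') on the
-- remaining string: the next chunk ends at max(find 'S', find 'E'); reverse that slice and cut it off.

-- ===== PORT A =====
-- loop over p with state (_p, _aux); '.count' of a single-char needle is List.count, exact
def solveGo (cs : List Char) (acc aux : List Char) : List Char :=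
  match cs with
  | [] => acc
  | c :: rest =>
    let aux' := aux ++ [c]
    if aux'.count 'E' ≠ 0 ∧ aux'.count 'S' ≠ 0 then
      solveGo rest (acc ++ aux'.reverse) []
    else
      solveGo rest acc aux'

def solve (n : Int) (p : String) : String := String.ofList (solveGo p.toList [] [])

-- ===== PORT B =====
-- termination fact, used by solveAltGo's decreasing_by
theorem pvDropLt (l : List Char) (k : Int)
    (hi : ¬ (PySem.Chars.find l ['S'] < 0 ∨ PySem.Chars.find l ['E'] < 0))
    (hk : k = max (PySem.Chars.find l ['S']) (PySem.Chars.find l ['E']) + 1) :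
    (PySem.List.slice l (some k) none).length < l.length := by
  push_neg at hi
  have hmem : ['S'] <:+: l := (PySem.Chars.find_nonneg_iff l ['S']).mp hi.1
  have hne : l ≠ [] := by rintro rfl; simp [List.infix_nil] at hmem
  have hk1 : 1 ≤ k := by omega
  have hsl : PySem.List.slice l (some k) none = l.drop k.toNat := by
    have hk2 : k = ((k.toNat : Nat) : Int) := by omega
    rw [hk2, PySem.List.slice_from_natCast]
    try congr 1
    try omega
  rw [hsl]
  have hlen : 0 < l.length := List.length_pos_iff.mpr hne
  have : 1 ≤ k.toNat := by omega
  simp only [List.length_drop]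
  omega

-- while-loop over the shrinking remainder; rest.find('S') is PySem.Chars.find, slices exact
def solveAltGo (rest : List Char) : List Char :=
  let i := PySem.Chars.find rest ['S']
  let j := PySem.Chars.find rest ['E']
  if h : i < 0 ∨ j < 0 then []
  else
    let k := max i j + 1
    (PySem.List.slice rest none (some k)).reverse ++ solveAltGo (PySem.List.slice rest (some k) none)
termination_by rest.length
decreasing_by exact pvDropLt rest _ h rfl

def solve_alt (n : Int) (p : String) : String := String.ofList (solveAltGo p.toList)

-- ===== PRECONDITION & SPEC =====
def Spec_solve (n : Int) (p : String) (out : String) : Prop := out = solve_alt n p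
instance (n : Int) (p : String) (out : String) : Decidable (Spec_solve n p out) := by unfold Spec_solve; infer_instance

-- ===== CLAIM (what is proved, stated in full; the proofs are below) =====
def Claim_equal_solve : Prop := ∀ (n : Int) (p : String), Dom_solve n p → Spec_solve n p (solve n p)

-- ===== LEMMAS AND PROOFS =====

-- [c] is a prefix of l.drop i exactly when l[i] = c
theorem singleton_prefix_drop (l : List Char) (c : Char) (i : Nat) (hi : i < l.length) :
    [c] <+: l.drop i ↔ l[i] = c := by
  rw [List.drop_eq_getElem_cons hi]
  constructor
  · intro h
    exact (List.cons_prefix_cons.mp h).1.symm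
  · rintro rfl
    exact ⟨_, rfl⟩

-- [c] <:+: l when c occurs at index m
theorem singleton_infix (l : List Char) (c : Char) (m : Nat) (hm : m < l.length)
    (hc : l[m] = c) : [c] <:+: l :=
  (((singleton_prefix_drop l c m hm).mpr hc).isInfix).trans (List.drop_suffix m l).isInfix

-- find of a single char equals m when l[m] = c and no earlier occurrence
theorem find_single_eq (l : List Char) (c : Char) (m : Nat) (hm : m < l.length)
    (hc : l[m] = c) (hmin : ∀ i, (h : i < m) → l[i]'(by omega) ≠ c) :
    PySem.Chars.find l [c] = (m : Int) := by
  have hnn : 0 ≤ PySem.Chars.find l [c] := by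
    rw [PySem.Chars.find_nonneg_iff]
    exact singleton_infix l c m hm hc
  obtain ⟨hpre, hlt⟩ := PySem.Chars.find_spec (s := l) (sub := [c]) hnn
  set t := (PySem.Chars.find l [c]).toNat with ht
  have h1 : t ≤ m := by
    by_contra h
    exact hlt m (by omega) ((singleton_prefix_drop l c m hm).mpr hc)
  have h2 : m ≤ t := by
    by_contra h
    have htl : t < l.length := by omega
    exact hmin t (by omega) ((singleton_prefix_drop l c t htl).mp hpre)
  omega

-- find ≤ any index where c occurs
theorem find_single_le (l : List Char) (c : Char) (m : Nat) (hm : m < l.length)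
    (hc : l[m] = c) : PySem.Chars.find l [c] ≤ (m : Int) := by
  have hnn : 0 ≤ PySem.Chars.find l [c] := by
    rw [PySem.Chars.find_nonneg_iff]
    exact singleton_infix l c m hm hc
  obtain ⟨_, hlt⟩ := PySem.Chars.find_spec (s := l) (sub := [c]) hnn
  by_contra h
  exact hlt m (by omega) ((singleton_prefix_drop l c m hm).mpr hc)

-- membership of c in l gives 0 ≤ find
theorem find_single_nonneg (l : List Char) (c : Char) (h : c ∈ l) :
    0 ≤ PySem.Chars.find l [c] := by
  rw [PySem.Chars.find_nonneg_iff]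
  obtain ⟨m, hm, hc⟩ := List.getElem_of_mem h
  exact singleton_infix l c m hm hc

theorem find_single_neg (l : List Char) (c : Char) (h : c ∉ l) :
    PySem.Chars.find l [c] = -1 := by
  rw [PySem.Chars.find_eq_neg_one_iff]
  intro hin
  obtain ⟨_, _, ht⟩ := hin
  exact h (by rw [← ht]; simp)

-- B's one-step unfolding at a flush point: aux lacks one of S/E, aux++[c] has both
theorem solveAltGo_flush (aux : List Char) (c : Char) (cs : List Char)
    (hnot : ¬ ('S' ∈ aux ∧ 'E' ∈ aux))
    (hboth : 'S' ∈ aux ++ [c] ∧ 'E' ∈ aux ++ [c]) :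
    solveAltGo (aux ++ c :: cs) = (aux ++ [c]).reverse ++ solveAltGo cs := by
  set l := aux ++ c :: cs with hl
  have hlen : aux.length < l.length := by simp [hl]
  have hlc : l[aux.length] = c := by
    show (aux ++ c :: cs)[aux.length]'(by simp) = c
    rw [List.getElem_append_right (Nat.le_refl _)]
    simp
  have haux : ∀ i, (h : i < aux.length) → l[i]'(by omega) = aux[i] := by
    intro i h
    show (aux ++ c :: cs)[i]'(by simp; omega) = aux[i]
    exact List.getElem_append_left h
  have hSl : 'S' ∈ l := by
    rcases List.mem_append.mp hboth.1 with h | h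
    · exact List.mem_append_left _ h
    · have : c = 'S' := (List.mem_singleton.mp h).symm
      rw [hl, this]; exact List.mem_append_right _ (List.mem_cons_self)
  have hEl : 'E' ∈ l := by
    rcases List.mem_append.mp hboth.2 with h | h
    · exact List.mem_append_left _ h
    · have : c = 'E' := (List.mem_singleton.mp h).symm
      rw [hl, this]; exact List.mem_append_right _ (List.mem_cons_self)
  have hnnS : 0 ≤ PySem.Chars.find l ['S'] := find_single_nonneg l 'S' hSl
  have hnnE : 0 ≤ PySem.Chars.find l ['E'] := find_single_nonneg l 'E' hEl
  -- the max of the two finds is exactly aux.length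
  have key : max (PySem.Chars.find l ['S']) (PySem.Chars.find l ['E']) = (aux.length : Int) := by
    rcases not_and_or.mp hnot with hS | hE
    · -- 'S' ∉ aux, so c = 'S' and the first S is at aux.length
      have hcS : c = 'S' := by
        rcases List.mem_append.mp hboth.1 with h | h
        · exact absurd h hS
        · exact (List.mem_singleton.mp h).symm
      have hfS : PySem.Chars.find l ['S'] = (aux.length : Int) := by
        refine find_single_eq l 'S' aux.length hlen (by rw [hlc, hcS]) ?_
        intro i hi hci
        have : aux[i] = 'S' := (haux i hi).symm.trans hci
        exact hS (this ▸ List.getElem_mem hi)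
      have hEmem : 'E' ∈ aux := by
        rcases List.mem_append.mp hboth.2 with h | h
        · exact h
        · exact absurd ((List.mem_singleton.mp h).trans hcS) (by decide)
      obtain ⟨m, hm, hcm⟩ := List.getElem_of_mem hEmem
      have hfE : PySem.Chars.find l ['E'] ≤ (m : Int) :=
        find_single_le l 'E' m (by omega) ((haux m hm).trans hcm)
      rw [hfS]; omega
    · -- 'E' ∉ aux, so c = 'E' and the first E is at aux.length
      have hcE : c = 'E' := by
        rcases List.mem_append.mp hboth.2 with h | h
        · exact absurd h hE
        · exact (List.mem_singleton.mp h).symm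
      have hfE : PySem.Chars.find l ['E'] = (aux.length : Int) := by
        refine find_single_eq l 'E' aux.length hlen (by rw [hlc, hcE]) ?_
        intro i hi hci
        have : aux[i] = 'E' := (haux i hi).symm.trans hci
        exact hE (this ▸ List.getElem_mem hi)
      have hSmem : 'S' ∈ aux := by
        rcases List.mem_append.mp hboth.1 with h | h
        · exact h
        · exact absurd ((List.mem_singleton.mp h).trans hcE) (by decide)
      obtain ⟨m, hm, hcm⟩ := List.getElem_of_mem hSmem
      have hfS : PySem.Chars.find l ['S'] ≤ (m : Int) :=
        find_single_le l 'S' m (by omega) ((haux m hm).trans hcm)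
      rw [hfE]; omega
  rw [solveAltGo]
  rw [dif_neg (by omega)]
  have hk : max (PySem.Chars.find l ['S']) (PySem.Chars.find l ['E']) + 1
      = (((aux.length + 1 : Nat)) : Int) := by rw [key]; push_cast; ring
  simp only [hk, PySem.List.slice_to_natCast, PySem.List.slice_from_natCast]
  have hsplit : l = (aux ++ [c]) ++ cs := by rw [hl]; simp
  congr 1
  · congr 1
    rw [hsplit, List.take_append_of_le_length (by simp)]
    simp
  · congr 1
    rw [hsplit, List.drop_append_of_le_length (by simp)]
    simp

-- B never emits anything when one of the markers is absent
theorem solveAltGo_none (l : List Char) (h : ¬ ('S' ∈ l ∧ 'E' ∈ l)) :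
    solveAltGo l = [] := by
  rw [solveAltGo]
  rcases not_and_or.mp h with h' | h'
  · rw [dif_pos (Or.inl (by rw [find_single_neg l 'S' h']; norm_num))]
  · rw [dif_pos (Or.inr (by rw [find_single_neg l 'E' h']; norm_num))]

-- count ≠ 0 ↔ membership, for rewriting A's flush condition
theorem count_ne_iff (l : List Char) (c : Char) : l.count c ≠ 0 ↔ c ∈ l := by
  simp [List.count_eq_zero]

-- main invariant: with a buffer that does not yet contain both markers,
-- A's loop produces acc ++ B's result on buffer ++ remaining input
theorem solveGo_eq (cs : List Char) : ∀ (acc aux : List Char),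
    ¬ ('S' ∈ aux ∧ 'E' ∈ aux) →
    solveGo cs acc aux = acc ++ solveAltGo (aux ++ cs) := by
  induction cs with
  | nil =>
    intro acc aux hnot
    rw [solveGo, List.append_nil, solveAltGo_none aux hnot, List.append_nil]
  | cons c rest ih =>
    intro acc aux hnot
    rw [solveGo]
    by_cases h : (aux ++ [c]).count 'E' ≠ 0 ∧ (aux ++ [c]).count 'S' ≠ 0
    · rw [if_pos h]
      have hboth : 'S' ∈ aux ++ [c] ∧ 'E' ∈ aux ++ [c] :=
        ⟨(count_ne_iff _ _).mp h.2, (count_ne_iff _ _).mp h.1⟩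
      rw [ih (acc ++ (aux ++ [c]).reverse) [] (by simp),
        solveAltGo_flush aux c rest hnot hboth]
      simp
    · rw [if_neg h]
      have hnot' : ¬ ('S' ∈ aux ++ [c] ∧ 'E' ∈ aux ++ [c]) := by
        intro hb
        exact h ⟨(count_ne_iff _ _).mpr hb.2, (count_ne_iff _ _).mpr hb.1⟩
      rw [ih acc (aux ++ [c]) hnot']
      simp

-- ===== VERDICT (by name: the statement is the Claim_ definition above) =====
theorem solve_spec : Claim_equal_solve := by
  intro n p _
  unfold Spec_solve solve solve_alt
  rw [solveGo_eq p.toList [] [] (by simp)]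
  simp
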